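-- pv_equiv track=rewrite | github.com/Raiper34/FIT-projects | 4 BIT/IPP/Projekt2/parser.py | rozsirenie
-- ===== SOURCE A (Python) =====
-- def rozsirenie(regularny):
--     rozsireniReg = ""
--     poslednyznak = ""
--     for pismenko in regularny: #ak je percento iba si ho uchovavam ci je posledny aby som vedel ze ktore +* je uz noralne alebo escapovane
--         if pismenko == "%":
--             if poslednyznak == "%":
--                 poslednyznak = ""
--                 rozsireniReg += pismenko
--             else:
--                 poslednyznak = "%"
--                 rozsireniReg += pismenko
--
--         elif pismenko == "*":
--             if poslednyznak == "%":
--                 poslednyznak = ""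
--                 rozsireniReg += pismenko
--             elif poslednyznak == "*":
--                 poslednyznak = "*"
--             elif poslednyznak == "+":
--                 rozsireniReg = rozsireniReg[:-1]
--                 rozsireniReg += pismenko
--                 poslednyznak = "*"
--             else:
--                 poslednyznak = "*"
--                 rozsireniReg += pismenko
--
--         elif pismenko == "+":
--             if poslednyznak == "%":
--                 poslednyznak = ""
--                 rozsireniReg += pismenko
--             elif poslednyznak == "*":
--                 poslednyznak = "*"
--             elif poslednyznak == "+":
--                 poslednyznak = "+"
--             else:
--                 poslednyznak = "+"
--                 rozsireniReg += pismenko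
--
--         else:
--             rozsireniReg += pismenko
--             poslednyznak = ""
--     return rozsireniReg
-- ===== SOURCE B (Python) =====
-- def rozsirenie(regularny):
--     # pass 1: tag each character as literal or unescaped operator, tracking % escapes
--     toks = []
--     esc = False
--     for ch in regularny:
--         if esc:
--             toks.append((False, ch))
--             esc = False
--         elif ch == '%':
--             toks.append((False, ch))
--             esc = True
--         elif ch in '*+':
--             toks.append((True, ch))
--         else:
--             toks.append((False, ch))
--     # pass 2: copy literals; collapse each maximal run of operators into '*' or '+'
--     out = []
--     i = 0
--     n = len(toks)
--     while i < n:
--         is_op, ch = toks[i]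
--         if not is_op:
--             out.append(ch)
--             i += 1
--         else:
--             star = False
--             while i < n and toks[i][0]:
--                 if toks[i][1] == '*':
--                     star = True
--                 i += 1
--             out.append('*' if star else '+')
--     return ''.join(out)
-- ===== Notes on version B (the rewrite author's own statement) =====
-- stated objective: alternative
-- what changed: Replaces A's single append-and-backtrack state machine (which re-emits characters and truncates the accumulator when a star follows a plus) with a two-pass pipeline: first classify each character as literal or unescaped operator while tracking percent escapes, then collapse each maximal operator run into a single star if the run contains one, else a single plus.
import Mathlib
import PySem

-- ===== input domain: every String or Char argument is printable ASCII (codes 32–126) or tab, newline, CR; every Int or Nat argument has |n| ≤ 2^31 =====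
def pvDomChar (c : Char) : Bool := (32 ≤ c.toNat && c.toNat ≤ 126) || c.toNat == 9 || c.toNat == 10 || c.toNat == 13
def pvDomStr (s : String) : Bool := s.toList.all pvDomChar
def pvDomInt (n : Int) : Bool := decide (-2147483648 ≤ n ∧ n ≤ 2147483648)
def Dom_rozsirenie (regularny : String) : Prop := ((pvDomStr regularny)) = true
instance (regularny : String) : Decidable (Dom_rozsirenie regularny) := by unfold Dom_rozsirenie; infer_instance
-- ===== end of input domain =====

-- B replaces A's single append-then-backtrack state machine by a classify pass
-- (escape tracking) followed by a run-collapsing pass; objective: alternative decomposition.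

-- ===== PORT A =====
-- state: accumulated output (as List Char) and `poslednyznak` kept as the same
-- one-character-or-empty String A uses; `acc.dropLast` is Python's `rozsireniReg[:-1]`.
def rozsirenieLoop (acc : List Char) (posl : String) : List Char → List Char
  | [] => acc
  | p :: rest =>
    if p = '%' then
      if posl = "%" then rozsirenieLoop (acc ++ [p]) "" rest
      else rozsirenieLoop (acc ++ [p]) "%" rest
    else if p = '*' then
      if posl = "%" then rozsirenieLoop (acc ++ [p]) "" rest
      else if posl = "*" then rozsirenieLoop acc "*" rest
      else if posl = "+" then rozsirenieLoop (acc.dropLast ++ [p]) "*" rest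
      else rozsirenieLoop (acc ++ [p]) "*" rest
    else if p = '+' then
      if posl = "%" then rozsirenieLoop (acc ++ [p]) "" rest
      else if posl = "*" then rozsirenieLoop acc "*" rest
      else if posl = "+" then rozsirenieLoop acc "+" rest
      else rozsirenieLoop (acc ++ [p]) "+" rest
    else rozsirenieLoop (acc ++ [p]) "" rest

def rozsirenie (regularny : String) : String :=
  String.mk (rozsirenieLoop [] "" regularny.toList)

-- ===== PORT B =====
-- pass 1: tag each char as operator (true) or literal (false), tracking % escapes
def pvClassify : Bool → List Char → List (Bool × Char)
  | _, [] => []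
  | true, c :: rest => (false, c) :: pvClassify false rest
  | false, c :: rest =>
    if c = '%' then (false, c) :: pvClassify true rest
    else if c = '*' ∨ c = '+' then (true, c) :: pvClassify false rest
    else (false, c) :: pvClassify false rest

-- pass 2: copy literals; collapse each maximal operator run to '*' if it contains
-- a '*', else '+' (pvCollapseRun scans one run, carrying the star flag)
mutual
def pvCollapse : List (Bool × Char) → List Char
  | [] => []
  | (false, c) :: rest => c :: pvCollapse rest
  | (true, c) :: rest => pvCollapseRun (c = '*') rest
termination_by ts => (ts.length, 0)
def pvCollapseRun (star : Bool) : List (Bool × Char) → List Char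
  | (true, c) :: rest => pvCollapseRun (star || c = '*') rest
  | ts => (if star then '*' else '+') :: pvCollapse ts
termination_by ts => (ts.length, 1)
end

def rozsirenie_alt (regularny : String) : String :=
  String.mk (pvCollapse (pvClassify false regularny.toList))

-- ===== PRECONDITION & SPEC =====
def Spec_rozsirenie (regularny : String) (out : String) : Prop := out = rozsirenie_alt regularny
instance (regularny : String) (out : String) : Decidable (Spec_rozsirenie regularny out) := by unfold Spec_rozsirenie; infer_instance

-- ===== CLAIM (what is proved, stated in full; the proofs are below) =====
def Claim_equal_rozsirenie : Prop := ∀ (regularny : String), Dom_rozsirenie regularny → Spec_rozsirenie regularny (rozsirenie regularny)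

-- ===== LEMMAS AND PROOFS =====
-- The four reachable states of A's loop versus B's two passes:
--   posl = ""  ↦ plain pvCollapse ∘ pvClassify false
--   posl = "%" ↦ pvCollapse ∘ pvClassify true (escape pending)
--   posl = "*" ↦ acc ends with the '*' A already emitted; B is mid-run with star seen
--   posl = "+" ↦ acc ends with '+'; B is mid-run, no star yet
lemma rozsirenie_key (cs : List Char) : ∀ acc : List Char,
    rozsirenieLoop acc "" cs = acc ++ pvCollapse (pvClassify false cs) ∧
    rozsirenieLoop acc "%" cs = acc ++ pvCollapse (pvClassify true cs) ∧
    rozsirenieLoop (acc ++ ['*']) "*" cs = acc ++ pvCollapseRun true (pvClassify false cs) ∧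
    rozsirenieLoop (acc ++ ['+']) "+" cs = acc ++ pvCollapseRun false (pvClassify false cs) := by
  induction cs with
  | nil => intro acc; simp [rozsirenieLoop, pvClassify, pvCollapse, pvCollapseRun]
  | cons p rest ih =>
    intro acc
    by_cases h1 : p = '%'
    · subst h1
      refine ⟨?_, ?_, ?_, ?_⟩ <;>
        simp [rozsirenieLoop, pvClassify, pvCollapse, pvCollapseRun,
              (ih (acc ++ ['%'])).1, (ih (acc ++ ['%'])).2.1,
              (ih (acc ++ ['*', '%'])).2.1, (ih (acc ++ ['+', '%'])).2.1]
    · by_cases h2 : p = '*'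
      · subst h2
        refine ⟨?_, ?_, ?_, ?_⟩ <;>
          simp [rozsirenieLoop, pvClassify, pvCollapse, pvCollapseRun,
                (ih acc).2.2.1,
                (ih (acc ++ ['*'])).1]
      · by_cases h3 : p = '+'
        · subst h3
          refine ⟨?_, ?_, ?_, ?_⟩ <;>
            simp [rozsirenieLoop, pvClassify, pvCollapse, pvCollapseRun,
                  (ih acc).2.2.1, (ih acc).2.2.2,
                  (ih (acc ++ ['+'])).1]
        · refine ⟨?_, ?_, ?_, ?_⟩ <;>
            simp [rozsirenieLoop, pvClassify, pvCollapse, pvCollapseRun, h1, h2, h3,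
                  (ih (acc ++ [p])).1,
                  (ih (acc ++ ['*', p])).1, (ih (acc ++ ['+', p])).1]

-- ===== VERDICT (by name: the statement is the Claim_ definition above) =====
theorem rozsirenie_spec : Claim_equal_rozsirenie := by
  intro s _
  show rozsirenie s = rozsirenie_alt s
  unfold rozsirenie rozsirenie_alt
  rw [(rozsirenie_key s.toList []).1]
  simp
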